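-- pv_equiv track=rewrite | github.com/UnrealLink/TDA-persistent-homology | ballgen.py | ballGenerator
-- ===== SOURCE A (Python) =====
-- def ballGenerator(d, plain = False):
--     """Generate text code for a filtration of the d-ball, or the d-1-sphere if plain is set to false.
--     The filtration used is a simplicial filtration of a d dimension tetraedra, where value is set equal to dim
--     in order to ensure that the creation is consistent.
--     A d dimension tetraedra contains all the possible simplex in it so the code simply has to generate all the
--     strictly increasing tuples of all the dimensions less than d"""
--     l = []
--     nbpoints = d + 1
--     for i in range(d):
--         dim = i
--         val = i
--         vertices = list(range(dim + 1))
--         while vertices[0] >= 0: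
--             nextline = str(val) + " " + str(dim)
--             for indice in vertices:
--                 nextline += " " + str(indice)
--             l.append(nextline)
--             for k in range(dim, -1, -1):
--                 vertices[k] += 1
--                 if vertices[k] >= nbpoints - dim + k:
--                     vertices[k] = -1
--                 else:
--                     break
--             for k in range(1, dim + 1):
--                 if vertices[k] == -1:
--                     vertices[k] = vertices[k-1] + 1
--     if plain:
--         nextline = str(d) + " " + str(d)
--         for i in range(nbpoints):
--             nextline += " " + str(i)
--         l.append(nextline)
--     return l
-- ===== SOURCE B (Python) =====
-- def ballGenerator(d, plain = False):
--     """Same filtration lines, but built level by level: the frontier of size-(i+1)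
--     combinations is derived from the previous level by appending each admissible
--     larger vertex, instead of re-generating each dimension from scratch with an
--     odometer.  Extending a lex-ordered level preserves lex order, since lex order
--     on (s+1)-tuples groups by the first s elements."""
--     l = []
--     level = [[v] for v in range(d + 1)]
--     for i in range(d):
--         for c in level:
--             l.append(" ".join(map(str, [i, i] + c)))
--         level = [c + [v] for c in level for v in range(c[-1] + 1, d + 1)]
--     if plain:
--         l.append(" ".join(map(str, [d, d] + list(range(d + 1)))))
--     return l
-- ===== Notes on version B (the rewrite author's own statement) =====
-- stated objective: alternative
-- what changed: A regenerates each dimension from scratch with a mutable odometer (increment/overflow/-1 sentinel plus a fix-up pass); B keeps a frontier of the current level's combinations and derives each next level from the previous one by appending every admissible larger vertex, emitting each level's lines as it goes.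
import Mathlib
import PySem

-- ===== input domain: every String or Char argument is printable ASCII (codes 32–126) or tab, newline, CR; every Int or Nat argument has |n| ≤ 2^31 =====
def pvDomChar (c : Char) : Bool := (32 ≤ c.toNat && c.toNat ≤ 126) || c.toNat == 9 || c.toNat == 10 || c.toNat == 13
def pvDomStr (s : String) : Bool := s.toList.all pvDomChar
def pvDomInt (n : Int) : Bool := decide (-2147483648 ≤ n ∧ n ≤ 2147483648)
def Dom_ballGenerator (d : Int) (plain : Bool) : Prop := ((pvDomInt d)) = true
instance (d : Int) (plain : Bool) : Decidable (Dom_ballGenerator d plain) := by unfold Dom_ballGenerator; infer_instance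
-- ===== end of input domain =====

-- B replaces A's per-dimension odometer (increment/overflow/-1 fix-up restarted for every
-- dimension) by a frontier kept across dimensions: each level of combinations is derived
-- from the previous level by appending every admissible larger vertex.

-- ===== PORT A =====
-- vertices[k] reads/writes: indices are always in range and non-negative in A, ported via PySem.List.pyGet? / List.set
def pvGetI (v : List Int) (k : Int) : Int := (PySem.List.pyGet? v k).getD 0
def pvSetI (v : List Int) (k : Int) (x : Int) : List Int := v.set k.toNat x

-- the carry loop 'for k in range(dim, -1, -1): vertices[k] += 1; if overflow: vertices[k] = -1 else break'
def pvCarryA (nbpoints dim : Int) : Nat → Int → List Int → List Int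
  | 0, _, v => v
  | fuel+1, k, v =>
    let v1 := pvSetI v k (pvGetI v k + 1)
    if pvGetI v1 k ≥ nbpoints - dim + k then pvCarryA nbpoints dim fuel (k-1) (pvSetI v1 k (-1))
    else v1

-- the fix-up loop 'for k in range(1, dim + 1): if vertices[k] == -1: vertices[k] = vertices[k-1] + 1'
def pvFixA (v0 : List Int) (ks : List Int) : List Int :=
  ks.foldl (fun v k => if pvGetI v k = -1 then pvSetI v k (pvGetI v (k-1) + 1) else v) v0

-- the 'while vertices[0] >= 0' loop; fuel (an upper bound on the iteration count) only makes it total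
def pvWhileA (nbpoints dim val : Int) : Nat → List Int → List String → List String
  | 0, _, l => l
  | fuel+1, vertices, l =>
    if 0 ≤ pvGetI vertices 0 then
      let nextline := vertices.foldl (fun s ind => s ++ ' ' :: PySem.Int.toChars ind)
          (PySem.Int.toChars val ++ ' ' :: PySem.Int.toChars dim)
      let l' := l ++ [String.mk nextline]
      let v1 := pvCarryA nbpoints dim (dim+1).toNat dim vertices
      let v2 := pvFixA v1 (PySem.List.pyRange 1 (dim+1))
      pvWhileA nbpoints dim val fuel v2 l'
    else l

def ballGenerator (d : Int) (plain : Bool) : List String :=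
  let nbpoints := d + 1
  let l := (PySem.List.pyRange 0 d).foldl (fun l i =>
      pvWhileA nbpoints i i (Nat.choose nbpoints.toNat (i+1).toNat + 1)
        (PySem.List.pyRange 0 (i+1)) l) []
  if plain then
    l ++ [String.mk ((PySem.List.pyRange 0 nbpoints).foldl
        (fun s j => s ++ ' ' :: PySem.Int.toChars j)
        (PySem.Int.toChars d ++ ' ' :: PySem.Int.toChars d))]
  else l

-- ===== PORT B =====
-- '" ".join(map(str, toks))'
def pvLineB (toks : List Int) : String :=
  String.mk (PySem.Chars.join [' '] (toks.map PySem.Int.toChars))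

-- '[c + [v] for c in level for v in range(c[-1] + 1, d + 1)]'; every c in a level is
-- nonempty, so c[-1] is exactly getLastD 0
def pvExtend (n : Int) (level : List (List Int)) : List (List Int) :=
  level.flatMap (fun c => (PySem.List.pyRange (c.getLastD 0 + 1) n).map (fun v => c ++ [v]))

def ballGenerator_alt (d : Int) (plain : Bool) : List String :=
  let st := (PySem.List.pyRange 0 d).foldl
    (fun (acc : List String × List (List Int)) i =>
      (acc.1 ++ acc.2.map (fun c => pvLineB (i :: i :: c)), pvExtend (d+1) acc.2))
    ([], (PySem.List.pyRange 0 (d+1)).map (fun v => [v]))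
  if plain then st.1 ++ [pvLineB (d :: d :: PySem.List.pyRange 0 (d+1))] else st.1

-- ===== PRECONDITION & SPEC =====
def Spec_ballGenerator (d : Int) (plain : Bool) (out : List String) : Prop := out = ballGenerator_alt d plain
instance (d : Int) (plain : Bool) (out : List String) : Decidable (Spec_ballGenerator d plain out) := by unfold Spec_ballGenerator; infer_instance

-- ===== CLAIM (what is proved, stated in full; the proofs are below) =====
def Claim_equal_ballGenerator : Prop := ∀ (d : Int) (plain : Bool), Dom_ballGenerator d plain → Spec_ballGenerator d plain (ballGenerator d plain)

-- ===== LEMMAS AND PROOFS =====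

-- proof device: the strictly increasing k-element tuples of xs in lexicographic order
def pvCombos : Nat → List Int → List (List Int)
  | 0, _ => [[]]
  | _+1, [] => []
  | k+1, x :: xs => (pvCombos k xs).map (x :: ·) ++ pvCombos (k+1) xs

-- the minimal strictly increasing run lo, lo+1, …, lo+m-1
def pvMinC (lo : Int) : Nat → List Int
  | 0 => []
  | m+1 => lo :: pvMinC (lo+1) m

-- lexicographic successor of a combination (none = last one); bounds mirror A's overflow test
def pvSucc (n : Int) : List Int → Option (List Int)
  | [] => none
  | x :: c =>
    match pvSucc n c with
    | some c' => some (x :: c')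
    | none => if x < n - ((c.length : Int) + 1) then some ((x+1) :: pvMinC (x+2) c.length) else none

-- the chain v, succ v, succ (succ v), … (fuel-bounded)
def pvEnum (n : Int) : Nat → List Int → List (List Int)
  | 0, _ => []
  | fuel+1, v => v :: (match pvSucc n v with | some w => pvEnum n fuel w | none => [])

-- "from v the successor chain is exactly L (and stops there)"
def pvEnumEq (n : Int) (v : List Int) (L : List (List Int)) : Prop :=
  ∀ f, L.length ≤ f → pvEnum n f v = L

-- structural form of A's fix-up scan
def pvFixS (prev : Int) : List Int → List Int
  | [] => []
  | a :: t => let a' := if a = -1 then prev + 1 else a; a' :: pvFixS a' t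

-- ---- small index lemmas ----
lemma pvGetI_pos (v : List Int) (k : Int) (h0 : 0 ≤ k) (h : k < (v.length : Int)) :
    pvGetI v k = v.getD k.toNat 0 := by
  simp [pvGetI, PySem.List.pyGet?, PySem.List.pyIdx?, h0, h, List.getD]

lemma pvGetI_concat (w : List Int) (x : Int) (t : List Int) :
    pvGetI (w ++ x :: t) (w.length : Int) = x := by
  rw [pvGetI_pos _ _ (by positivity) (by simp only [List.length_append, List.length_cons]; omega)]
  simp

lemma pvSetI_concat (w : List Int) (x : Int) (t : List Int) (b : Int) :
    pvSetI (w ++ x :: t) (w.length : Int) b = w ++ b :: t := by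
  simp [pvSetI]

lemma pvGetI_append (pre t : List Int) (k : Int) (h0 : 0 ≤ k) (h : k < (pre.length : Int)) :
    pvGetI (pre ++ t) k = pvGetI pre k := by
  rw [pvGetI_pos _ _ h0 (by simp only [List.length_append]; omega), pvGetI_pos _ _ h0 h]
  rw [List.getD_append]; omega

lemma pvSetI_append (pre t : List Int) (k : Int) (b : Int) (h0 : 0 ≤ k) (h : k < (pre.length : Int)) :
    pvSetI (pre ++ t) k b = pvSetI pre k b ++ t := by
  simp [pvSetI, List.set_append]; omega

lemma pvGetI_last (pre : List Int) (t : List Int) (hpre : pre ≠ []) :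
    pvGetI (pre ++ t) ((pre.length : Int) - 1) = pre.getLastD 0 := by
  have hl : 0 < pre.length := List.length_pos_iff.mpr hpre
  rw [pvGetI_pos _ _ (by omega) (by simp only [List.length_append]; omega)]
  have hk : ((pre.length : Int) - 1).toNat = pre.length - 1 := by omega
  rw [hk, List.getD_append _ _ _ _ (by omega), List.getD]
  rw [List.getLastD_eq_getLast?, List.getLast?_eq_getElem?]

lemma pvCarryA_length (nb dim : Int) : ∀ (fuel : Nat) (k : Int) (v : List Int),
    (pvCarryA nb dim fuel k v).length = v.length := by
  intro fuel
  induction fuel with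
  | zero => intro k v; rfl
  | succ f ih =>
      intro k v
      simp only [pvCarryA]
      split
      · rw [ih]; simp [pvSetI]
      · simp [pvSetI]

-- ---- carry lemmas ----
lemma pvCarryA_shift (nb dim s : Int) : ∀ (fuel : Nat) (k : Int) (v : List Int),
    pvCarryA (nb + s) (dim + s) fuel k v = pvCarryA nb dim fuel k v := by
  intro fuel
  induction fuel with
  | zero => intro k v; rfl
  | succ f ih =>
      intro k v
      simp only [pvCarryA]
      have he : nb + s - (dim + s) + k = nb - dim + k := by ring
      rw [he]
      split
      · rw [ih]
      · rfl

lemma pvCarry_extend (nb dim : Int) : ∀ (fuel : Nat) (k : Int) (pre t : List Int),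
    (fuel : Int) ≤ k + 1 → k < (pre.length : Int) →
    pvCarryA nb dim fuel k (pre ++ t) = pvCarryA nb dim fuel k pre ++ t := by
  intro fuel
  induction fuel with
  | zero => intro _ _ _ _ _; rfl
  | succ f ih =>
      intro k pre t hf hk
      have h0 : 0 ≤ k := by push_cast at hf; omega
      simp only [pvCarryA]
      rw [pvGetI_append _ _ _ h0 hk, pvSetI_append _ _ _ _ h0 hk,
        pvGetI_append _ _ _ h0 (by simpa [pvSetI] using hk),
        pvSetI_append _ _ _ _ h0 (by simpa [pvSetI] using hk)]
      split
      · exact ih (k - 1) _ t (by push_cast at hf; omega) (by simp [pvSetI]; omega)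
      · rfl

lemma pvCarry_snoc (nb dim : Int) (w : List Int) (x : Int) :
    pvCarryA nb dim (w.length + 1) (w.length : Int) (w ++ [x]) =
    if nb - dim + (w.length : Int) ≤ x + 1 then
      pvCarryA nb dim w.length ((w.length : Int) - 1) w ++ [-1]
    else w ++ [x + 1] := by
  have hx : pvGetI (w ++ [x]) (w.length : Int) = x := pvGetI_concat w x []
  simp only [pvCarryA, hx, pvSetI_concat w x [] (x + 1), pvGetI_concat w (x+1) [],
    pvSetI_concat w (x+1) [] (-1)]
  split
  · exact pvCarry_extend nb dim w.length ((w.length : Int) - 1) w [-1] (by omega) (by omega)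
  · rfl

-- ---- range lemmas ----
lemma pvRange_nil (a b : Int) (h : b ≤ a) : PySem.List.pyRange a b = [] := by
  simp only [List.eq_nil_iff_forall_not_mem]
  intro x hx
  rw [PySem.List.mem_pyRange_one] at hx
  omega

lemma pvRange_length : ∀ (t : Nat) (a b : Int), (b - a).toNat ≤ t →
    (PySem.List.pyRange a b).length = (b - a).toNat := by
  intro t
  induction t with
  | zero => intro a b h; rw [pvRange_nil a b (by omega)]; simp; omega
  | succ f ih =>
      intro a b h
      by_cases hab : b ≤ a
      · rw [pvRange_nil a b hab]; simp; omega
      · rw [PySem.List.pyRange_one_cons (by omega), List.length_cons, ih (a+1) b (by omega)]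
        omega

lemma pvRange_eq_minC : ∀ (m : Nat) (lo : Int),
    PySem.List.pyRange lo (lo + (m : Int)) = pvMinC lo m := by
  intro m
  induction m with
  | zero => intro lo; rw [show lo + ((0:Nat):Int) = lo by omega, pvRange_nil lo lo (by omega)]; rfl
  | succ f ih =>
      intro lo
      rw [PySem.List.pyRange_one_cons (by push_cast; omega)]
      have he : lo + ((f + 1 : Nat) : Int) = (lo + 1) + (f : Int) := by push_cast; ring
      rw [he, ih (lo + 1)]
      rfl

-- ---- fix-up lemmas ----
lemma pvFixA_eq : ∀ (t pre : List Int), pre ≠ [] →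
    pvFixA (pre ++ t) (PySem.List.pyRange (pre.length : Int) ((pre.length : Int) + (t.length : Int))) =
    pre ++ pvFixS (pre.getLastD 0) t := by
  intro t
  induction t with
  | nil =>
      intro pre hpre
      rw [show (pre.length : Int) + (([] : List Int).length : Int) = (pre.length : Int) by simp]
      rw [pvRange_nil _ _ le_rfl]
      simp [pvFixA, pvFixS]
  | cons a t' ih =>
      intro pre hpre
      have hcons : PySem.List.pyRange (pre.length : Int) ((pre.length : Int) + ((a :: t').length : Int)) =
          (pre.length : Int) :: PySem.List.pyRange ((pre.length : Int) + 1) ((pre.length : Int) + ((a :: t').length : Int)) := by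
        rw [PySem.List.pyRange_one_cons (by simp only [List.length_cons]; push_cast; omega)]
      rw [hcons]
      simp only [pvFixA, List.foldl_cons]
      rw [pvGetI_concat pre a t', pvGetI_last pre (a :: t') hpre]
      have hstep : (if a = -1 then pvSetI (pre ++ a :: t') (pre.length : Int) (pre.getLastD 0 + 1)
            else pre ++ a :: t') =
          pre ++ (if a = -1 then pre.getLastD 0 + 1 else a) :: t' := by
        split
        · rw [pvSetI_concat]
        · rfl
      rw [hstep]
      set a' : Int := if a = -1 then pre.getLastD 0 + 1 else a with ha'
      have hsplit : pre ++ a' :: t' = (pre ++ [a']) ++ t' := by simp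
      have hlen : (pre.length : Int) + 1 = ((pre ++ [a']).length : Int) := by simp
      have hend : (pre.length : Int) + ((a :: t').length : Int) =
          ((pre ++ [a']).length : Int) + (t'.length : Int) := by simp; ring
      rw [hsplit, hlen, hend]
      have := ih (pre ++ [a']) (by simp)
      simp only [pvFixA] at this
      rw [this]
      rw [List.getLastD_concat]
      simp only [pvFixS]
      rw [← ha']
      simp

lemma pvFix_call (a : Int) (t : List Int) :
    pvFixA (a :: t) (PySem.List.pyRange 1 (1 + (t.length : Int))) = a :: pvFixS a t := by
  have := pvFixA_eq t [a] (by simp)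
  simpa using this

lemma pvFixS_id (prev : Int) : ∀ (t : List Int), (∀ a ∈ t, a ≠ -1) → pvFixS prev t = t := by
  intro t
  induction t generalizing prev with
  | nil => intro _; rfl
  | cons a t' ih =>
      intro h
      have ha : a ≠ -1 := h a (by simp)
      simp only [pvFixS, if_neg ha]
      rw [ih a (fun b hb => h b (by simp [hb]))]

lemma pvFixS_snoc (prev b : Int) : ∀ (t : List Int),
    pvFixS prev (t ++ [b]) =
    pvFixS prev t ++ [if b = -1 then (pvFixS prev t).getLastD prev + 1 else b] := by
  intro t
  induction t generalizing prev with
  | nil => simp [pvFixS]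
  | cons a t' ih =>
      simp only [pvFixS, List.cons_append, List.getLastD_cons]
      rw [ih]

-- ---- minC / succ lemmas ----
lemma pvMinC_length : ∀ (m : Nat) (lo : Int), (pvMinC lo m).length = m := by
  intro m
  induction m with
  | zero => intro lo; rfl
  | succ f ih => intro lo; simp [pvMinC, ih]

lemma pvMinC_snoc : ∀ (m : Nat) (lo : Int), pvMinC lo (m+1) = pvMinC lo m ++ [lo + m] := by
  intro m
  induction m with
  | zero => intro lo; simp [pvMinC]
  | succ f ih =>
      intro lo
      show lo :: pvMinC (lo+1) (f+1) = (lo :: pvMinC (lo+1) f) ++ [lo + ((f+1 : Nat) : Int)]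
      rw [ih (lo+1)]
      simp only [List.cons_append, List.cons.injEq, true_and]
      congr 2
      push_cast; ring

lemma pvMinC_getLastD (lo : Int) (m : Nat) (d : Int) :
    (pvMinC lo (m+1)).getLastD d = lo + m := by
  rw [pvMinC_snoc, List.getLastD_concat]

lemma pvMinC_mem : ∀ (m : Nat) (lo a : Int), a ∈ pvMinC lo m → lo ≤ a := by
  intro m
  induction m with
  | zero => intro lo a h; simp [pvMinC] at h
  | succ f ih =>
      intro lo a h
      simp only [pvMinC, List.mem_cons] at h
      rcases h with h | h
      · omega
      · have := ih (lo+1) a h; omega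

lemma pvSucc_length (n : Int) : ∀ (v w : List Int), pvSucc n v = some w → w.length = v.length := by
  intro v
  induction v with
  | nil => intro w h; simp [pvSucc] at h
  | cons x c ih =>
      intro w h
      simp only [pvSucc] at h
      rcases hc : pvSucc n c with _ | c'
      · rw [hc] at h
        by_cases hx : x < n - ((c.length : Int) + 1)
        · rw [if_pos hx] at h
          cases h
          simp [pvMinC_length]
        · rw [if_neg hx] at h; cases h
      · rw [hc] at h
        cases h
        simp [ih c' hc]

lemma pvSucc_nonneg (n : Int) : ∀ (v w : List Int), pvSucc n v = some w →
    (∀ a ∈ v, 0 ≤ a) → ∀ a ∈ w, 0 ≤ a := by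
  intro v
  induction v with
  | nil => intro w h; simp [pvSucc] at h
  | cons x c ih =>
      intro w h hv
      simp only [pvSucc] at h
      rcases hc : pvSucc n c with _ | c'
      · rw [hc] at h
        by_cases hx : x < n - ((c.length : Int) + 1)
        · rw [if_pos hx] at h
          cases h
          intro a ha
          simp only [List.mem_cons] at ha
          have hx0 : 0 ≤ x := hv x (by simp)
          rcases ha with rfl | ha
          · omega
          · have := pvMinC_mem c.length (x+2) a ha; omega
        · rw [if_neg hx] at h; cases h
      · rw [hc] at h
        cases h
        intro a ha
        simp only [List.mem_cons] at ha
        rcases ha with rfl | ha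
        · exact hv a (by simp)
        · exact ih c' hc (fun b hb => hv b (by simp [hb])) a ha

lemma pvSucc_append (n : Int) : ∀ (w : List Int) (x : Int),
    pvSucc n (w ++ [x]) =
    if x < n - 1 then some (w ++ [x + 1])
    else (pvSucc (n-1) w).map (fun w' => w' ++ [w'.getLastD 0 + 1]) := by
  intro w
  induction w with
  | nil =>
      intro x
      simp only [pvSucc, List.nil_append, List.length_nil]
      rw [show (n : Int) - ((0 : Nat) + 1 : Int) = n - 1 by push_cast; ring]
      split
      · rfl
      · rfl
  | cons y w2 ih =>
      intro x
      rw [List.cons_append]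
      by_cases hx : x < n - 1
      · have hinner : pvSucc n (w2 ++ [x]) = some (w2 ++ [x+1]) := by rw [ih x, if_pos hx]
        rw [if_pos hx]
        simp only [pvSucc, hinner, List.cons_append]
      · have hinner : pvSucc n (w2 ++ [x]) =
            (pvSucc (n-1) w2).map (fun w' => w' ++ [w'.getLastD 0 + 1]) := by
          rw [ih x, if_neg hx]
        rw [if_neg hx]
        rcases hs : pvSucc (n-1) w2 with _ | w2'
        · -- the whole tail w2 ++ [x] overflows: the carry reaches y
          have h2 : pvSucc n (w2 ++ [x]) = none := by rw [hinner, hs]; rfl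
          simp only [pvSucc, h2, hs]
          have hlen : ((w2 ++ [x]).length : Int) + 1 = (w2.length : Int) + 2 := by
            simp only [List.length_append, List.length_cons, List.length_nil]; push_cast; ring
          rw [hlen]
          by_cases hy : y < (n-1) - ((w2.length : Int) + 1)
          · rw [if_pos (by omega), if_pos hy]
            simp only [Option.map_some, Option.some.injEq]
            have hlen2 : (w2 ++ [x]).length = w2.length + 1 := by simp
            rw [hlen2]
            have e1 : (y+1) :: pvMinC (y+2) (w2.length + 1) = pvMinC (y+1) (w2.length + 2) := by
              have h : pvMinC (y+1) (w2.length + 2) = (y+1) :: pvMinC ((y+1)+1) (w2.length + 1) := rfl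
              rw [h, show (y:Int)+1+1 = y+2 by ring]
            have e2 : (y+1) :: pvMinC (y+2) w2.length = pvMinC (y+1) (w2.length + 1) := by
              have h : pvMinC (y+1) (w2.length + 1) = (y+1) :: pvMinC ((y+1)+1) w2.length := rfl
              rw [h, show (y:Int)+1+1 = y+2 by ring]
            rw [e1, e2, pvMinC_snoc (w2.length + 1) (y+1), pvMinC_getLastD]
            congr 2
            push_cast; ring
          · rw [if_neg (by omega), if_neg hy]
            rfl
        · -- the carry is resolved inside w2
          have hw2 : w2 ≠ [] := by
            intro hnil; rw [hnil] at hs; simp [pvSucc] at hs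
          have hw2' : w2' ≠ [] := by
            have := pvSucc_length (n-1) w2 w2' hs
            intro hnil; rw [hnil] at this
            exact hw2 (List.eq_nil_of_length_eq_zero this.symm)
          have h2 : pvSucc n (w2 ++ [x]) = some (w2' ++ [w2'.getLastD 0 + 1]) := by
            rw [hinner, hs]; rfl
          simp only [pvSucc, h2, hs, Option.map_some, Option.some.injEq, List.cons_append]
          congr 2
          cases w2' with
          | nil => exact absurd rfl hw2'
          | cons b t => simp

-- ---- the step lemma: one iteration of A's carry + fix-up is the lexicographic successor ----
lemma pvStep : ∀ (v : List Int) (n : Int), v ≠ [] → (∀ a ∈ v, 0 ≤ a) →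
    pvFixA (pvCarryA n ((v.length : Int) - 1) v.length ((v.length : Int) - 1) v)
      (PySem.List.pyRange 1 (v.length : Int)) =
    (match pvSucc n v with
     | some w => w
     | none => -1 :: pvMinC 0 (v.length - 1)) := by
  intro v
  induction v using List.reverseRecOn with
  | nil => intro n h _; exact absurd rfl h
  | append_singleton w x ih =>
      intro n hne hpos
      have hL : (w ++ [x]).length = w.length + 1 := by simp
      have hd : ((w ++ [x]).length : Int) - 1 = (w.length : Int) := by rw [hL]; push_cast; ring
      rw [hd, hL, pvCarry_snoc n (w.length : Int) w x,
        show n - (w.length : Int) + (w.length : Int) = n by ring]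
      by_cases hx : n ≤ x + 1
      · -- the last position overflows
        rw [if_pos hx]
        have hsh : pvCarryA n (w.length : Int) w.length ((w.length : Int) - 1) w =
            pvCarryA (n-1) ((w.length : Int) - 1) w.length ((w.length : Int) - 1) w := by
          conv_lhs => rw [show n = (n-1) + 1 by ring,
            show (w.length : Int) = ((w.length : Int) - 1) + 1 by ring]
          rw [pvCarryA_shift (n-1) ((w.length : Int) - 1) 1]
          norm_num
        rw [hsh]
        set cw := pvCarryA (n-1) ((w.length : Int) - 1) w.length ((w.length : Int) - 1) w with hcw
        by_cases hw : w = []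
        · subst hw
          have hcw0 : cw = [] := rfl
          rw [hcw0, show (([] : List Int) ++ [-1]) = [-1] by simp,
            show ((([] : List Int).length + 1 : Nat) : Int) = 1 by simp,
            pvRange_nil 1 1 le_rfl, pvSucc_append, if_neg (by omega)]
          rfl
        · have hwlen : 0 < w.length := List.length_pos_iff.mpr hw
          have hcl : cw.length = w.length := pvCarryA_length _ _ _ _ _
          rcases hcwe : cw with _ | ⟨a, tl⟩
          · rw [hcwe] at hcl; simp at hcl; omega
          · have htl : tl.length = w.length - 1 := by
              rw [hcwe] at hcl; simp at hcl; omega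
            have hrange : ((w.length + 1 : Nat) : Int) = 1 + ((tl ++ [-1]).length : Int) := by
              simp only [List.length_append, List.length_cons, List.length_nil]
              push_cast; omega
            rw [show (a :: tl) ++ [-1] = a :: (tl ++ [-1]) by simp, hrange,
              pvFix_call a (tl ++ [-1]), pvFixS_snoc a (-1) tl, if_pos rfl]
            -- the induction hypothesis applied to w (in the (n-1)-world)
            have hposw : ∀ b ∈ w, 0 ≤ b := fun b hb => hpos b (by simp [hb])
            have hih := ih (n-1) hw hposw
            have hihrange : ((w.length : Nat) : Int) = 1 + (tl.length : Int) := by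
              omega
            rw [← hcw, hcwe, hihrange, pvFix_call a tl] at hih
            rw [pvSucc_append, if_neg (by omega)]
            rcases hs : pvSucc (n-1) w with _ | w'
            · simp only [hs] at hih
              have ha : a = -1 := (List.cons.injEq _ _ _ _).mp hih |>.1
              have hfixtl : pvFixS a tl = pvMinC 0 (w.length - 1) :=
                (List.cons.injEq _ _ _ _).mp hih |>.2
              simp only [Option.map_none]
              rw [hfixtl, ha]
              rcases hq : w.length - 1 with _ | r
              · rw [show w.length + 1 - 1 = 1 by omega]
                rfl
              · rw [show w.length + 1 - 1 = (r + 1) + 1 by omega,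
                  pvMinC_snoc (r+1) 0, pvMinC_getLastD]
                simp
            · simp only [hs] at hih
              simp only [Option.map_some]
              rw [← hih]
              simp only [List.cons_append, List.cons.injEq, true_and, List.append_cancel_left_eq,
                List.cons.injEq, and_true, List.getLastD_eq_getLast?]
              rcases pvFixS a tl with _ | ⟨b, l⟩
              · simp
              · have hsome : (b :: l).getLast?.isSome := by simp
                obtain ⟨c, hc⟩ := Option.isSome_iff_exists.mp hsome
                rw [hc, List.getLast?_cons_cons, hc]
                rfl
      · -- no overflow at the last position: just increment it
        rw [if_neg hx]
        have hsu : pvSucc n (w ++ [x]) = some (w ++ [x+1]) := by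
          rw [pvSucc_append, if_pos (by omega)]
        rw [hsu]
        rcases w with _ | ⟨b, t⟩
        · simp only [List.nil_append, List.length_nil]
          rw [show ((0 + 1 : Nat) : Int) = (1:Int) by norm_num, pvRange_nil 1 1 le_rfl]
          rfl
        · have hrange : ((( b :: t).length + 1 : Nat) : Int) = 1 + ((t ++ [x+1]).length : Int) := by
            simp only [List.length_append, List.length_cons, List.length_nil]
            push_cast; omega
          rw [show (b :: t) ++ [x+1] = b :: (t ++ [x+1]) by simp, hrange,
            pvFix_call b (t ++ [x+1])]
          have hid : pvFixS b (t ++ [x+1]) = t ++ [x+1] := by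
            apply pvFixS_id
            intro c hc
            rcases List.mem_append.mp hc with hc | hc
            · have := hpos c (by simp [hc]); omega
            · simp only [List.mem_singleton] at hc
              have := hpos x (by simp)
              omega
          rw [hid]

-- ---- enumeration chain lemmas ----
lemma pvEnumEq_none (n : Int) (c : List Int) (h : pvSucc n c = none) : pvEnumEq n c [c] := by
  intro f hf
  match f, hf with
  | g+1, _ => simp only [pvEnum, h]

lemma pvEnumEq_some (n : Int) (c w : List Int) (L : List (List Int))
    (h : pvSucc n c = some w) (h2 : pvEnumEq n w L) : pvEnumEq n c (c :: L) := by
  intro f hf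
  match f, hf with
  | g+1, hf =>
      simp only [pvEnum, h]
      rw [h2 g (by simpa using hf)]

lemma pvEnumEq_destruct (n : Int) (c : List Int) (L : List (List Int)) (h : pvEnumEq n c L) :
    (pvSucc n c = none ∧ L = [c]) ∨
    (∃ w L', pvSucc n c = some w ∧ L = c :: L' ∧ pvEnumEq n w L') := by
  have h1 := h (L.length + 1) (by omega)
  rcases hs : pvSucc n c with _ | w
  · left
    refine ⟨rfl, ?_⟩
    rw [← h1]
    simp only [pvEnum, hs]
  · right
    have h2 := h (L.length + 1) (by omega)
    simp only [pvEnum, hs] at h2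
    refine ⟨w, pvEnum n L.length w, rfl, h2.symm, ?_⟩
    intro f hf
    have h3 := h (f + 1) (by rw [← h2]; simp only [List.length_cons]; omega)
    simp only [pvEnum, hs] at h3
    rw [← h2] at h3
    exact (List.cons.injEq _ _ _ _).mp h3 |>.2

lemma pvLift_lt (n x : Int) : ∀ (L : List (List Int)) (c : List Int) (M : List (List Int)),
    pvEnumEq n c L → x < n - ((c.length : Int) + 1) →
    pvEnumEq n ((x+1) :: pvMinC (x+2) c.length) M →
    pvEnumEq n (x :: c) (L.map (x :: ·) ++ M) := by
  intro L
  induction L with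
  | nil =>
      intro c M h _ _
      rcases pvEnumEq_destruct n c [] h with ⟨_, h2⟩ | ⟨_, _, _, h2, _⟩ <;> simp at h2
  | cons a L' ihL =>
      intro c M h hx hM
      rcases pvEnumEq_destruct n c (a :: L') h with ⟨hs, h2⟩ | ⟨w, L'', hs, h2, h3⟩
      · -- c is the last of its block: the carry moves into x
        obtain ⟨ha, hL'⟩ := (List.cons.injEq _ _ _ _).mp h2
        subst ha
        subst hL'
        have hsx : pvSucc n (x :: a) = some ((x+1) :: pvMinC (x+2) a.length) := by
          simp only [pvSucc, hs, if_pos hx]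
        simpa using pvEnumEq_some n (x :: a) _ M hsx hM
      · obtain ⟨ha, hL''⟩ := (List.cons.injEq _ _ _ _).mp h2
        subst ha
        subst hL''
        have hsx : pvSucc n (x :: a) = some (x :: w) := by
          simp only [pvSucc, hs]
        have hwlen : w.length = a.length := pvSucc_length n a w hs
        have htail := ihL w M h3 (by rw [hwlen]; exact hx) (by rw [hwlen]; exact hM)
        simpa using pvEnumEq_some n (x :: a) _ _ hsx htail

lemma pvLift_ge (n x : Int) : ∀ (L : List (List Int)) (c : List Int),
    pvEnumEq n c L → ¬ x < n - ((c.length : Int) + 1) →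
    pvEnumEq n (x :: c) (L.map (x :: ·)) := by
  intro L
  induction L with
  | nil =>
      intro c h _
      rcases pvEnumEq_destruct n c [] h with ⟨_, h2⟩ | ⟨_, _, _, h2, _⟩ <;> simp at h2
  | cons a L' ihL =>
      intro c h hx
      rcases pvEnumEq_destruct n c (a :: L') h with ⟨hs, h2⟩ | ⟨w, L'', hs, h2, h3⟩
      · obtain ⟨ha, hL'⟩ := (List.cons.injEq _ _ _ _).mp h2
        subst ha
        subst hL'
        have hsx : pvSucc n (x :: a) = none := by
          simp only [pvSucc, hs, if_neg hx]
        simpa using pvEnumEq_none n (x :: a) hsx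
      · obtain ⟨ha, hL''⟩ := (List.cons.injEq _ _ _ _).mp h2
        subst ha
        subst hL''
        have hsx : pvSucc n (x :: a) = some (x :: w) := by
          simp only [pvSucc, hs]
        have hwlen : w.length = a.length := pvSucc_length n a w hs
        have htail := ihL w h3 (by rw [hwlen]; exact hx)
        simpa using pvEnumEq_some n (x :: a) _ _ hsx htail

-- ---- the main enumeration lemma: the successor chain from the minimal combination is pvCombos ----
lemma pvCombos_short : ∀ (m : Nat) (xs : List Int), xs.length < m → pvCombos m xs = [] := by
  intro m xs
  induction xs generalizing m with
  | nil =>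
      intro h
      match m, h with
      | k+1, _ => rfl
  | cons x xs ih =>
      intro h
      match m, h with
      | k+1, h =>
          show (pvCombos k xs).map (x :: ·) ++ pvCombos (k+1) xs = []
          rw [ih k (by simp at h; omega), ih (k+1) (by simp at h; omega)]
          rfl

lemma pvCombos_length : ∀ (m : Nat) (xs : List Int), (pvCombos m xs).length = xs.length.choose m := by
  intro m xs
  induction xs generalizing m with
  | nil => cases m <;> rfl
  | cons x xs ih =>
      cases m with
      | zero => simp [pvCombos]
      | succ k =>
          show ((pvCombos k xs).map (x :: ·) ++ pvCombos (k+1) xs).length = _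
          rw [List.length_append, List.length_map, ih k, ih (k+1)]
          rw [List.length_cons, Nat.choose_succ_succ]

lemma pvMain (n : Int) : ∀ (t : Nat) (lo : Int) (m : Nat), (n - lo).toNat ≤ t → lo + (m : Int) ≤ n →
    pvEnumEq n (pvMinC lo m) (pvCombos m (PySem.List.pyRange lo n)) := by
  intro t
  induction t with
  | zero =>
      intro lo m h1 h2
      cases m with
      | zero =>
          have hc0 : pvCombos 0 (PySem.List.pyRange lo n) = [[]] := by
            cases PySem.List.pyRange lo n <;> rfl
          rw [hc0]
          exact pvEnumEq_none n [] rfl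
      | succ k => exfalso; push_cast at h2; omega
  | succ t' ih =>
      intro lo m h1 h2
      cases m with
      | zero =>
          have hc0 : pvCombos 0 (PySem.List.pyRange lo n) = [[]] := by
            cases PySem.List.pyRange lo n <;> rfl
          rw [hc0]
          exact pvEnumEq_none n [] rfl
      | succ k =>
          have hlo : lo < n := by push_cast at h2; omega
          rw [PySem.List.pyRange_one_cons hlo]
          have hcform : pvCombos (k+1) (lo :: PySem.List.pyRange (lo+1) n) =
              (pvCombos k (PySem.List.pyRange (lo+1) n)).map (lo :: ·) ++
              pvCombos (k+1) (PySem.List.pyRange (lo+1) n) := rfl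
          rw [hcform]
          have ih1 := ih (lo+1) k (by omega) (by push_cast at h2 ⊢; omega)
          show pvEnumEq n (lo :: pvMinC (lo+1) k) _
          have hclen : (pvMinC (lo+1) k).length = k := pvMinC_length k (lo+1)
          by_cases hy : lo < n - ((k : Int) + 1)
          · have ih2 := ih (lo+1) (k+1) (by omega) (by push_cast at h2 ⊢; omega)
            have hM : pvEnumEq n ((lo+1) :: pvMinC (lo+2) (pvMinC (lo+1) k).length)
                (pvCombos (k+1) (PySem.List.pyRange (lo+1) n)) := by
              rw [hclen, show (lo : Int) + 2 = lo+1+1 by ring]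
              exact ih2
            exact pvLift_lt n lo _ (pvMinC (lo+1) k) _ ih1 (by rw [hclen]; exact_mod_cast hy) hM
          · have hlast := pvLift_ge n lo _ (pvMinC (lo+1) k) ih1 (by rw [hclen]; exact_mod_cast hy)
            have hempty : pvCombos (k+1) (PySem.List.pyRange (lo+1) n) = [] := by
              apply pvCombos_short
              rw [pvRange_length ((n - (lo+1)).toNat) _ _ le_rfl]
              push_cast at h2
              omega
            rw [hempty, List.append_nil]
            exact hlast

-- ---- line formatting: A's fold equals B's join ----
lemma pvFoldLine : ∀ (v : List Int) (pre : List Char),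
    v.foldl (fun s i => s ++ ' ' :: PySem.Int.toChars i) pre =
    pre ++ (v.map (fun i => ' ' :: PySem.Int.toChars i)).flatten := by
  intro v
  induction v with
  | nil => intro pre; simp
  | cons a t ih =>
      intro pre
      rw [List.foldl_cons, ih]
      simp

lemma pvJoinSp : ∀ (ts : List (List Char)) (a : List Char),
    PySem.Chars.join [' '] (a :: ts) = a ++ (ts.map (fun t => ' ' :: t)).flatten := by
  intro ts
  induction ts with
  | nil => intro a; simp [PySem.Chars.join_singleton]
  | cons t ts ih =>
      intro a
      rw [PySem.Chars.join_cons_cons, ih t]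
      simp

lemma pvLineEq (val dimv : Int) (c : List Int) :
    String.mk (c.foldl (fun s ind => s ++ ' ' :: PySem.Int.toChars ind)
      (PySem.Int.toChars val ++ ' ' :: PySem.Int.toChars dimv)) = pvLineB (val :: dimv :: c) := by
  unfold pvLineB
  rw [pvFoldLine]
  congr 1
  rw [List.map_cons, List.map_cons, pvJoinSp]
  simp [List.map_map, Function.comp_def]

lemma pvGetI_zero (a : Int) (t : List Int) : pvGetI (a :: t) 0 = a := by
  rw [pvGetI_pos _ _ le_rfl (by simp)]
  rfl

lemma pvWhile_stop (n dim val : Int) : ∀ (f : Nat) (st : List Int) (l : List String),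
    pvGetI st 0 < 0 → pvWhileA n dim val f st l = l := by
  intro f st l h
  cases f with
  | zero => rfl
  | succ g =>
      simp only [pvWhileA]
      rw [if_neg (show ¬ (0:Int) ≤ pvGetI st 0 by omega)]

-- ---- the while loop emits exactly the chain ----
lemma pvLoop (n val : Int) : ∀ (L : List (List Int)) (v : List Int) (l : List String) (fuel : Nat),
    pvEnumEq n v L → v ≠ [] → (∀ a ∈ v, 0 ≤ a) → L.length ≤ fuel →
    pvWhileA n ((v.length : Int) - 1) val fuel v l =
    l ++ L.map (fun c => pvLineB (val :: ((v.length : Int) - 1) :: c)) := by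
  intro L
  induction L with
  | nil =>
      intro v l fuel h _ _ _
      rcases pvEnumEq_destruct n v [] h with ⟨_, h2⟩ | ⟨_, _, _, h2, _⟩ <;> simp at h2
  | cons a L' ihL =>
      intro v l fuel h hne hpos hfuel
      match fuel, hfuel with
      | f+1, hfuel =>
        have hv0 : 0 ≤ pvGetI v 0 := by
          rcases v with _ | ⟨vh, vt⟩
          · exact absurd rfl hne
          · rw [pvGetI_zero]
            exact hpos vh (by simp)
        simp only [pvWhileA, if_pos hv0]
        have hfix1 : (((v.length : Int) - 1) + 1).toNat = v.length := by omega
        have hfix2 : (((v.length : Int) - 1) + 1) = (v.length : Int) := by ring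
        rw [hfix1, hfix2, pvStep v n hne hpos]
        rcases pvEnumEq_destruct n v (a :: L') h with ⟨hs, h2⟩ | ⟨w, L'', hs, h2, h3⟩
        · obtain ⟨rfl, hL'⟩ := (List.cons.injEq _ _ _ _).mp h2
          subst hL'
          rw [hs]
          rw [pvWhile_stop n _ val f _ _ (by rw [pvGetI_zero]; omega)]
          rw [pvLineEq]
          simp
        · obtain ⟨rfl, hL''⟩ := (List.cons.injEq _ _ _ _).mp h2
          subst hL''
          rw [hs]
          have hwlen : w.length = a.length := pvSucc_length n a w hs
          have hwne : w ≠ [] := by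
            intro hnil
            rw [hnil] at hwlen
            exact hne (List.eq_nil_of_length_eq_zero hwlen.symm)
          have hwpos : ∀ b ∈ w, 0 ≤ b := pvSucc_nonneg n a w hs hpos
          have hdim : ((a.length : Int) - 1) = ((w.length : Int) - 1) := by rw [hwlen]
          rw [hdim]
          rw [ihL w (l ++ [_]) f h3 hwne hwpos (by simpa using hfuel)]
          rw [pvLineEq]
          simp [hwlen]

-- ---- per-dimension result ----
lemma pvPerDim (d i : Int) (h0 : 0 ≤ i) (hd : i < d) (l : List String) :
    pvWhileA (d+1) i i (Nat.choose (d+1).toNat (i+1).toNat + 1) (PySem.List.pyRange 0 (i+1)) l =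
    l ++ (pvCombos (i+1).toNat (PySem.List.pyRange 0 (d+1))).map (fun c => pvLineB (i :: i :: c)) := by
  have hm : (0 : Int) + (((i+1).toNat : Nat) : Int) = i + 1 := by omega
  have hv : PySem.List.pyRange 0 (i+1) = pvMinC 0 (i+1).toNat := by
    rw [← pvRange_eq_minC (i+1).toNat 0, hm]
  have henum := pvMain (d+1) (d+1-0).toNat 0 (i+1).toNat le_rfl (by omega)
  have hlenv : (PySem.List.pyRange 0 (i+1)).length = (i+1).toNat := by
    rw [hv, pvMinC_length]
  have hLlen : (pvCombos (i+1).toNat (PySem.List.pyRange 0 (d+1))).length =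
      Nat.choose (d+1).toNat (i+1).toNat := by
    rw [pvCombos_length, pvRange_length (d+1-0).toNat 0 (d+1) le_rfl]
    congr 1
    omega
  have hdim : ((PySem.List.pyRange 0 (i+1)).length : Int) - 1 = i := by
    rw [hlenv]; omega
  have hpos : ∀ b ∈ PySem.List.pyRange 0 (i+1), 0 ≤ b := by
    intro b hb
    exact (PySem.List.mem_pyRange_one.mp hb).1
  have hne : PySem.List.pyRange 0 (i+1) ≠ [] := by
    intro hnil
    rw [hnil] at hlenv
    simp at hlenv
    omega
  have hloop := pvLoop (d+1) i (pvCombos (i+1).toNat (PySem.List.pyRange 0 (d+1)))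
    (PySem.List.pyRange 0 (i+1)) l (Nat.choose (d+1).toNat (i+1).toNat + 1)
    (by rw [hv]; exact henum) hne hpos (by rw [hLlen]; omega)
  rw [hdim] at hloop
  rw [show (d + 1 : Int).toNat = (d+1).toNat from rfl] at hloop
  exact hloop

-- ---- B-side lemmas: the frontier extension builds the next pvCombos level ----
lemma pvCombos_ne_nil : ∀ (xs : List Int) (m : Nat) (c : List Int),
    c ∈ pvCombos (m+1) xs → c ≠ [] := by
  intro xs
  induction xs with
  | nil => intro m c h; simp [pvCombos] at h
  | cons x xs ih =>
      intro m c h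
      have h' : c ∈ (pvCombos m xs).map (x :: ·) ++ pvCombos (m+1) xs := h
      rcases List.mem_append.mp h' with h1 | h1
      · obtain ⟨c', _, rfl⟩ := List.mem_map.mp h1
        simp
      · exact ih m c h1

lemma pvCombos_one : ∀ (xs : List Int), pvCombos 1 xs = xs.map (fun v => [v]) := by
  intro xs
  induction xs with
  | nil => rfl
  | cons x xs ih =>
      have h0 : pvCombos 0 xs = [[]] := by cases xs <;> rfl
      show (pvCombos 0 xs).map (x :: ·) ++ pvCombos 1 xs = _
      rw [h0, ih]
      rfl

lemma pvExtend_append (n : Int) (L1 L2 : List (List Int)) :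
    pvExtend n (L1 ++ L2) = pvExtend n L1 ++ pvExtend n L2 := by
  simp [pvExtend]

lemma pvExtend_map_cons (n lo : Int) : ∀ (L : List (List Int)), (∀ c ∈ L, c ≠ []) →
    pvExtend n (L.map (lo :: ·)) = (pvExtend n L).map (lo :: ·) := by
  intro L
  induction L with
  | nil => intro _; rfl
  | cons c L' ih =>
      intro h
      have hc : c ≠ [] := h c (by simp)
      have hlast : (lo :: c).getLastD 0 = c.getLastD 0 := by
        rcases c with _ | ⟨b, t⟩
        · exact absurd rfl hc
        · simp [List.getLastD_cons]
      have ih' := ih (fun b hb => h b (by simp [hb]))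
      simp only [pvExtend, List.flatMap_cons, List.map_cons, List.map_append, List.map_map] at *
      rw [hlast, ih']
      simp [Function.comp_def]

lemma pvExtend_combos (n : Int) : ∀ (t : Nat) (lo : Int) (k : Nat), 1 ≤ k → (n - lo).toNat ≤ t →
    pvExtend n (pvCombos k (PySem.List.pyRange lo n)) = pvCombos (k+1) (PySem.List.pyRange lo n) := by
  intro t
  induction t with
  | zero =>
      intro lo k hk ht
      rw [pvRange_nil lo n (by omega)]
      match k, hk with
      | k'+1, _ => rfl
  | succ t' ih =>
      intro lo k hk ht
      by_cases hlo : n ≤ lo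
      · rw [pvRange_nil lo n hlo]
        match k, hk with
        | k'+1, _ => rfl
      · rw [PySem.List.pyRange_one_cons (by omega)]
        match k, hk with
        | k'+1, _ =>
          set R := PySem.List.pyRange (lo+1) n with hR
          have hsplit : pvCombos (k'+1) (lo :: R) =
              (pvCombos k' R).map (lo :: ·) ++ pvCombos (k'+1) R := rfl
          rw [hsplit, pvExtend_append]
          have htail : pvExtend n (pvCombos (k'+1) R) = pvCombos (k'+2) R :=
            ih (lo+1) (k'+1) (by omega) (by omega)
          have hhead : pvExtend n ((pvCombos k' R).map (lo :: ·)) =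
              (pvCombos (k'+1) R).map (lo :: ·) := by
            cases k' with
            | zero =>
                have h0 : pvCombos 0 R = [[]] := by rw [hR]; cases PySem.List.pyRange (lo+1) n <;> rfl
                rw [h0, pvCombos_one]
                simp only [pvExtend, List.map_cons, List.map_nil, List.flatMap_cons,
                  List.flatMap_nil, List.append_nil, List.getLastD_cons, List.getLastD_nil,
                  List.map_map, Function.comp_def]
                rw [hR]
                simp
            | succ k'' =>
                rw [pvExtend_map_cons n lo _ (fun c hc => pvCombos_ne_nil R k'' c hc),
                  ih (lo+1) (k''+1) (by omega) (by omega)]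
          rw [hhead, htail]
          rfl

-- the foldl of B maintains the frontier = current pvCombos level
lemma pvFoldB (d : Int) : ∀ (t : Nat) (j : Int) (l : List String) (lev : List (List Int)),
    0 ≤ j → (d - j).toNat ≤ t → lev = pvCombos (j+1).toNat (PySem.List.pyRange 0 (d+1)) →
    ((PySem.List.pyRange j d).foldl
      (fun (acc : List String × List (List Int)) i =>
        (acc.1 ++ acc.2.map (fun c => pvLineB (i :: i :: c)), pvExtend (d+1) acc.2)) (l, lev)).1
    = l ++ (PySem.List.pyRange j d).flatMap (fun i =>
        (pvCombos (i+1).toNat (PySem.List.pyRange 0 (d+1))).map (fun c => pvLineB (i :: i :: c))) := by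
  intro t
  induction t with
  | zero =>
      intro j l lev _ ht _
      rw [pvRange_nil j d (by omega)]
      simp
  | succ t' ih =>
      intro j l lev hj ht hlev
      by_cases hjd : d ≤ j
      · rw [pvRange_nil j d hjd]; simp
      · rw [PySem.List.pyRange_one_cons (by omega), List.foldl_cons, List.flatMap_cons]
        have hnext : pvExtend (d+1) lev = pvCombos ((j+1)+1).toNat (PySem.List.pyRange 0 (d+1)) := by
          rw [hlev, pvExtend_combos (d+1) (d+1-0).toNat 0 (j+1).toNat (by omega) le_rfl]
          congr 1
          omega
        rw [ih (j+1) (l ++ lev.map (fun c => pvLineB (j :: j :: c)))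
          (pvExtend (d+1) lev) (by omega) (by omega) hnext, hlev]
        simp [List.append_assoc]

-- ===== VERDICT (by name: the statement is the Claim_ definition above) =====
theorem ballGenerator_spec : Claim_equal_ballGenerator := by
  intro d plain _
  unfold Spec_ballGenerator
  simp only [ballGenerator, ballGenerator_alt]
  have key : ∀ (xs : List Int) (acc : List String), (∀ i ∈ xs, 0 ≤ i ∧ i < d) →
      xs.foldl (fun l i => pvWhileA (d+1) i i (Nat.choose (d+1).toNat (i+1).toNat + 1)
        (PySem.List.pyRange 0 (i+1)) l) acc =
      acc ++ xs.flatMap (fun i => (pvCombos (i+1).toNat (PySem.List.pyRange 0 (d+1))).map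
        (fun c => pvLineB (i :: i :: c))) := by
    intro xs
    induction xs with
    | nil => intro acc _; simp
    | cons i xs ih =>
        intro acc hmem
        rw [List.foldl_cons, pvPerDim d i (hmem i (by simp)).1 (hmem i (by simp)).2 acc,
          ih _ (fun j hj => hmem j (by simp [hj])), List.flatMap_cons, List.append_assoc]
  have hinit : (PySem.List.pyRange 0 (d+1)).map (fun v => [v]) =
      pvCombos ((0:Int)+1).toNat (PySem.List.pyRange 0 (d+1)) := by
    rw [show ((0:Int)+1).toNat = 1 by omega, pvCombos_one]
  have hB := pvFoldB d (d-0).toNat 0 []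
    ((PySem.List.pyRange 0 (d+1)).map (fun v => [v])) le_rfl le_rfl hinit
  rw [key (PySem.List.pyRange 0 d) [] (fun i hi => by
    have hm := PySem.List.mem_pyRange_one.mp hi
    exact ⟨hm.1, hm.2⟩)]
  rw [hB]
  simp only [List.nil_append]
  cases plain with
  | false => rfl
  | true =>
      rw [pvLineEq d d (PySem.List.pyRange 0 (d+1))]
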